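-- pv_equiv track=rewrite | github.com/sueszli/vector-database-benchmark | dataset/python-mutated/vader.py | allcap_differential
-- ===== SOURCE A (Python) =====
-- def allcap_differential(words):
--     if False:
--         return 10
--     '\n        Check whether just some words in the input are ALL CAPS\n\n        :param list words: The words to inspect\n        :returns: `True` if some but not all items in `words` are ALL CAPS\n        '
--     is_different = False
--     allcap_words = 0
--     for word in words:
--         if word.isupper():
--             allcap_words += 1
--     cap_differential = len(words) - allcap_words
--     if 0 < cap_differential < len(words):
--         is_different = True
--     return is_different
-- ===== SOURCE B (Python) =====
-- def allcap_differential(words):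
--     # Two short-circuiting boolean reductions instead of a counting loop.
--     return any(w.isupper() for w in words) and not all(w.isupper() for w in words)
-- ===== Notes on version B (the rewrite author's own statement) =====
-- stated objective: idiomatic
-- what changed: Replaced the counting loop and the 0 < len-count < len comparison with two short-circuiting any/all reductions over word.isupper().
import Mathlib
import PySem

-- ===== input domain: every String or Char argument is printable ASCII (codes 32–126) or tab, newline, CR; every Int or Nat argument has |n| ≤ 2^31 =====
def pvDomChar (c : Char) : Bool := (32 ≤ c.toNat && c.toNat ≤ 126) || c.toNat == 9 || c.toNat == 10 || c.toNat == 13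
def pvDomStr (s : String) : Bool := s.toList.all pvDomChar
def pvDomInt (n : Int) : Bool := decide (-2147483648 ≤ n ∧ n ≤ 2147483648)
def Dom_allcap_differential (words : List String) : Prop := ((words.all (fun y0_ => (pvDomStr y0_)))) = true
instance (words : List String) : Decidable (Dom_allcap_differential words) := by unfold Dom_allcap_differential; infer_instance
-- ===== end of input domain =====

-- B replaces A's counting loop + range test by two short-circuiting any/all reductions (idiomatic; same cost).

-- shared primitive: Python str.isupper, exact on ASCII (at least one cased char, no lowercase char)
def pyIsupper (s : String) : Bool :=
  s.toList.any PySem.Chars.isupper && s.toList.all (fun c => !PySem.Chars.islower c)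

-- ===== PORT A =====
def allcap_differential (words : List String) : Bool :=
  let allcap_words : Int :=
    words.foldl (fun acc word => if pyIsupper word then acc + 1 else acc) 0
  let cap_differential : Int := (words.length : Int) - allcap_words
  if 0 < cap_differential ∧ cap_differential < (words.length : Int) then true else false

-- ===== PORT B =====
def allcap_differential_alt (words : List String) : Bool :=
  words.any (fun w => pyIsupper w) && !(words.all (fun w => pyIsupper w))

-- ===== PRECONDITION & SPEC =====
def Spec_allcap_differential (words : List String) (out : Bool) : Prop := out = allcap_differential_alt words
instance (words : List String) (out : Bool) : Decidable (Spec_allcap_differential words out) := by unfold Spec_allcap_differential; infer_instance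

-- ===== CLAIM (what is proved, stated in full; the proofs are below) =====
def Claim_equal_allcap_differential : Prop := ∀ (words : List String), Dom_allcap_differential words → Spec_allcap_differential words (allcap_differential words)

-- ===== LEMMAS AND PROOFS =====
theorem pv_count_foldl (ws : List String) (acc : Int) :
    ws.foldl (fun acc word => if pyIsupper word then acc + 1 else acc) acc
      = acc + (ws.countP pyIsupper : Int) := by
  induction ws generalizing acc with
  | nil => simp
  | cons w ws ih =>
    by_cases h : pyIsupper w <;> simp [List.foldl_cons, h, ih] <;> ring

-- ===== VERDICT (by name: the statement is the Claim_ definition above) =====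
theorem allcap_differential_spec : Claim_equal_allcap_differential := by
  intro words _
  unfold Spec_allcap_differential allcap_differential allcap_differential_alt
  rw [pv_count_foldl, zero_add]
  have hle : words.countP pyIsupper ≤ words.length :=
    List.countP_le_length (p := pyIsupper) (l := words)
  dsimp only
  split_ifs with h
  · obtain ⟨h1, h2⟩ := h
    have hc : 0 < words.countP pyIsupper := by omega
    have hn : words.countP pyIsupper < words.length := by omega
    obtain ⟨w, hw, hwp⟩ := List.countP_pos_iff.1 hc
    have hany : words.any pyIsupper = true := List.any_eq_true.2 ⟨w, hw, hwp⟩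
    have hall : words.all pyIsupper = false := by
      rcases Bool.eq_false_or_eq_true (words.all pyIsupper) with ht | hf
      · have := List.countP_eq_length.2 (List.all_eq_true.1 ht)
        omega
      · exact hf
    show true = (words.any pyIsupper && !words.all pyIsupper)
    rw [hany, hall]
    rfl
  · show false = (words.any pyIsupper && !words.all pyIsupper)
    by_cases hc : 0 < words.countP pyIsupper
    · have hcl : words.countP pyIsupper = words.length := by omega
      have hall : words.all pyIsupper = true :=
        List.all_eq_true.2 (fun a ha => List.countP_eq_length.1 hcl a ha)
      rw [hall, Bool.not_true, Bool.and_false]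
    · have hany : words.any pyIsupper = false := by
        rcases Bool.eq_false_or_eq_true (words.any pyIsupper) with ht | hf
        · obtain ⟨a, ha, hp⟩ := List.any_eq_true.1 ht
          exact absurd (List.countP_pos_iff.2 ⟨a, ha, hp⟩) hc
        · exact hf
      rw [hany, Bool.false_and]
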